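-- pv_equiv track=rewrite | github.com/danielgebara/ITI1520 | Devoir2/d2.py | facteursDeN
-- ===== SOURCE A (Python) =====
-- def facteursDeN(n):
-- # Calcule le facteur et la somme de n est si la somme est plus haut que la facteur il retourne faux sinon oui
--     ''' (int) -> bool '''
--     facteurs = []
--     for i in range (2, n):
--         if (n % i == 0):
--             facteurs.append(i)
--     if not facteurs:
--         return False
--     somme = sum(facteurs)
--     print ("Les Facteurs de ", n, "= ", facteurs)
--     print ("Somme des Facteurs = ", somme)
--     return somme < n
-- ===== SOURCE B (Python) =====
-- def facteursDeN(n):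
--     # Divisor-pairing rewrite: scan only i with i*i <= n, pairing i with n // i (O(sqrt n) instead of O(n)).
--     ''' (int) -> bool '''
--     if n < 4:
--         return False
--     small = []
--     large = []
--     i = 2
--     while i * i <= n:
--         if n % i == 0:
--             small.append(i)
--             j = n // i
--             if j != i:
--                 large.append(j)
--         i += 1
--     if not small:
--         return False
--     facteurs = small + large[::-1]
--     somme = sum(facteurs)
--     print("Les Facteurs de ", n, "= ", facteurs)
--     print("Somme des Facteurs = ", somme)
--     return somme < n
-- ===== Notes on version B (the rewrite author's own statement) =====
-- stated objective: faster
-- what changed: Replaces the O(n) scan of all candidates 2..n-1 with a sqrt(n) divisor-pairing loop: each divisor i with i*i <= n is paired with its cofactor n//i, and the two halves are concatenated (large half reversed) to rebuild the same sorted divisor list.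
import Mathlib
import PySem

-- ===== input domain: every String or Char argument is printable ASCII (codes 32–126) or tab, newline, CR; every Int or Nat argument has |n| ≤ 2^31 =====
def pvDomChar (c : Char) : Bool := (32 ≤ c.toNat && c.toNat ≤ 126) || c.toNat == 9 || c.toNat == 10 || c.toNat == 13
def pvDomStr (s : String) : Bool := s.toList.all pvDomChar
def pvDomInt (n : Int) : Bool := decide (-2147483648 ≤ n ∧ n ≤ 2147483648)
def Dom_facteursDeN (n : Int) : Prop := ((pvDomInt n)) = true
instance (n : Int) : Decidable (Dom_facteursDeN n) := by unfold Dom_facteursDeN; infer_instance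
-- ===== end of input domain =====

-- B replaces A's O(n) scan of 2..n-1 by an O(sqrt n) divisor-pairing loop; equivalence is about the
-- return value (both Pythons also print the same two lines, which the ports omit).

-- ===== PORT A =====
def facteursDeN (n : Int) : Bool :=
  let facteurs := (PySem.List.pyRange 2 n 1).foldl
    (fun acc i => if PySem.Int.mod n i == 0 then acc ++ [i] else acc) []
  if facteurs = [] then false
  else decide (facteurs.sum < n)

-- ===== PORT B =====
-- termination measure for the while-loop (cited by altLoop's decreasing_by)
theorem altLoop_dec (n i : Int) (h : i * i ≤ n) : (n + 2 - (i + 1)).toNat < (n + 2 - i).toNat := by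
  have hn0 : 0 ≤ n := le_trans (mul_self_nonneg i) h
  have hi : i < n + 2 := by
    rcases le_or_gt i 1 with h1 | h1
    · linarith
    · have h2 : i ≤ i * i := le_mul_of_one_le_left (by linarith) (le_of_lt h1)
      linarith
  have hb : 0 < n + 2 - i := by linarith
  have hab : n + 2 - (i + 1) < n + 2 - i := by linarith
  exact (Int.toNat_lt_toNat hb).mpr hab

-- the while-loop of Source B: i goes up while i*i ≤ n, collecting small divisors and their cofactors
def altLoop (n i : Int) (small large : List Int) : List Int × List Int :=
  if h : i * i ≤ n then
    if PySem.Int.mod n i == 0 then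
      let j := PySem.Int.floordiv n i
      altLoop n (i + 1) (small ++ [i]) (if j ≠ i then large ++ [j] else large)
    else
      altLoop n (i + 1) small large
  else
    (small, large)
termination_by (n + 2 - i).toNat
decreasing_by
  all_goals exact altLoop_dec n i h

def facteursDeN_alt (n : Int) : Bool :=
  if n < 4 then false
  else
    let (small, large) := altLoop n 2 [] []
    if small = [] then false
    else decide ((small ++ large.reverse).sum < n)

-- ===== PRECONDITION & SPEC =====
def Spec_facteursDeN (n : Int) (out : Bool) : Prop := out = facteursDeN_alt n
instance (n : Int) (out : Bool) : Decidable (Spec_facteursDeN n out) := by unfold Spec_facteursDeN; infer_instance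

-- ===== CLAIM (what is proved, stated in full; the proofs are below) =====
def Claim_equal_facteursDeN : Prop := ∀ (n : Int), Dom_facteursDeN n → Spec_facteursDeN n (facteursDeN n)

-- ===== LEMMAS AND PROOFS =====

-- integer square root, used only by the proofs
def isq (n : Int) : Int := (Nat.sqrt n.toNat : Int)

theorem isq_nonneg (n : Int) : 0 ≤ isq n := Int.natCast_nonneg _

theorem le_isq_iff (n i : Int) (hn : 0 ≤ n) (hi : 0 ≤ i) : i * i ≤ n ↔ i ≤ isq n := by
  obtain ⟨a, rfl⟩ := Int.eq_ofNat_of_zero_le hi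
  obtain ⟨m, rfl⟩ := Int.eq_ofNat_of_zero_le hn
  unfold isq
  rw [Int.toNat_natCast]
  constructor
  · intro h
    exact_mod_cast Nat.le_sqrt.mpr (by exact_mod_cast h)
  · intro h
    exact_mod_cast Nat.le_sqrt.mp (by exact_mod_cast h)

theorem isq_ge_two (n : Int) (hn : 4 ≤ n) : 2 ≤ isq n :=
  (le_isq_iff n 2 (by omega) (by omega)).mp (by omega)

theorem isq_sq_le (n : Int) (hn : 4 ≤ n) : isq n * isq n ≤ n :=
  (le_isq_iff n (isq n) (by omega) (isq_nonneg n)).mpr le_rfl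

theorem isq_lt (n : Int) (hn : 4 ≤ n) : isq n < n := by
  have h1 := isq_ge_two n hn
  have h2 := isq_sq_le n hn
  nlinarith

-- loop characterization: altLoop collects exactly the filtered range [i, isq n]
theorem altLoop_char (n : Int) (hn : 4 ≤ n) :
    ∀ (i : Int) (small large : List Int), 2 ≤ i →
    altLoop n i small large =
      (small ++ (PySem.List.pyRange i (isq n + 1) 1).filter (fun d => PySem.Int.mod n d == 0),
       large ++ ((PySem.List.pyRange i (isq n + 1) 1).filter
          (fun d => (PySem.Int.mod n d == 0) && !(PySem.Int.floordiv n d == d))).map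
          (fun d => PySem.Int.floordiv n d)) := by
  have key : ∀ (k : Nat) (i : Int) (small large : List Int), (n + 2 - i).toNat = k → 2 ≤ i →
      altLoop n i small large =
      (small ++ (PySem.List.pyRange i (isq n + 1) 1).filter (fun d => PySem.Int.mod n d == 0),
       large ++ ((PySem.List.pyRange i (isq n + 1) 1).filter
          (fun d => (PySem.Int.mod n d == 0) && !(PySem.Int.floordiv n d == d))).map
          (fun d => PySem.Int.floordiv n d)) := by
    intro k
    induction k using Nat.strong_induction_on with
    | _ k ih =>
      intro i small large hk hi
      rw [altLoop]
      by_cases h : i * i ≤ n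
      · have hle : i ≤ isq n := (le_isq_iff n i (by omega) (by omega)).mp h
        have hcons : PySem.List.pyRange i (isq n + 1) 1 =
            i :: PySem.List.pyRange (i + 1) (isq n + 1) 1 :=
          PySem.List.pyRange_one_cons (by omega)
        have hin : i < n + 2 := by nlinarith
        rw [dif_pos h]
        have hrec := fun s l => ih (n + 2 - (i + 1)).toNat (by omega) (i + 1) s l rfl (by omega)
        by_cases hm : (PySem.Int.mod n i == 0) = true
        · rw [if_pos hm]
          by_cases hj : PySem.Int.floordiv n i = i
          · rw [hrec]
            simp [hcons, hm, hj]
          · rw [hrec]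
            simp [hcons, hm, hj]
        · rw [if_neg hm, hrec]
          simp [hcons, hm]
      · have hgt : isq n + 1 ≤ i := by
          by_contra hc
          exact h ((le_isq_iff n i (by omega) (by omega)).mpr (by omega))
        rw [dif_neg h, PySem.List.pyRange_one_eq_nil hgt]
        simp
  intro i small large hi
  exact key _ i small large rfl hi

-- the two filtered lists are equal: A's sorted divisor list = small ++ large.reverse
theorem lists_eq (n : Int) (hn : 4 ≤ n) :
    (PySem.List.pyRange 2 n 1).filter (fun d => PySem.Int.mod n d == 0) =
      (PySem.List.pyRange 2 (isq n + 1) 1).filter (fun d => PySem.Int.mod n d == 0) ++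
      (((PySem.List.pyRange 2 (isq n + 1) 1).filter
          (fun d => (PySem.Int.mod n d == 0) && !(PySem.Int.floordiv n d == d))).map
          (fun d => PySem.Int.floordiv n d)).reverse := by
  set r := isq n with hr
  have hr2 : 2 ≤ r := isq_ge_two n hn
  have hrsq : r * r ≤ n := isq_sq_le n hn
  have hrn : r < n := isq_lt n hn
  -- membership characterizations
  have memL : ∀ x : Int,
      (x ∈ (PySem.List.pyRange 2 n 1).filter (fun d => PySem.Int.mod n d == 0)) ↔
      (2 ≤ x ∧ x < n ∧ x ∣ n) := by
    intro x
    simp only [List.mem_filter, PySem.List.mem_pyRange_one, beq_iff_eq,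
      PySem.Int.mod_eq_zero_iff_dvd]
    tauto
  have memS : ∀ x : Int,
      (x ∈ (PySem.List.pyRange 2 (r + 1) 1).filter (fun d => PySem.Int.mod n d == 0)) ↔
      (2 ≤ x ∧ x ≤ r ∧ x ∣ n) := by
    intro x
    simp only [List.mem_filter, PySem.List.mem_pyRange_one, beq_iff_eq,
      PySem.Int.mod_eq_zero_iff_dvd]
    constructor
    · rintro ⟨⟨h1, h2⟩, h3⟩; exact ⟨h1, by omega, h3⟩
    · rintro ⟨h1, h2, h3⟩; exact ⟨⟨h1, by omega⟩, h3⟩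
  -- facts about q-elements
  have memQ : ∀ d : Int,
      (d ∈ (PySem.List.pyRange 2 (r + 1) 1).filter
          (fun d => (PySem.Int.mod n d == 0) && !(PySem.Int.floordiv n d == d))) ↔
      (2 ≤ d ∧ d ≤ r ∧ d ∣ n ∧ n / d ≠ d) := by
    intro d
    simp only [List.mem_filter, PySem.List.mem_pyRange_one, Bool.and_eq_true, beq_iff_eq,
      PySem.Int.mod_eq_zero_iff_dvd, Bool.not_eq_eq_eq_not, Bool.not_true, beq_eq_false_iff_ne,
      ne_eq]
    constructor
    · rintro ⟨⟨h1, h2⟩, h3, h4⟩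
      rw [PySem.Int.floordiv_eq_ediv_of_pos (by omega)] at h4
      exact ⟨h1, by omega, h3, h4⟩
    · rintro ⟨h1, h2, h3, h4⟩
      rw [PySem.Int.floordiv_eq_ediv_of_pos (by omega)]
      exact ⟨⟨h1, by omega⟩, h3, h4⟩
  -- cofactor facts: for a q-element d, its cofactor c = n / d satisfies r < c < n, c ∣ n
  have cofac : ∀ d : Int, 2 ≤ d → d ≤ r → d ∣ n → n / d ≠ d →
      (n / d ∣ n ∧ r < n / d ∧ n / d < n ∧ d < n / d) := by
    intro d h2 hdr hdvd hne
    obtain ⟨c, hc⟩ := hdvd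
    have hdpos : 0 < d := by omega
    have hcdiv : n / d = c := by rw [hc, Int.mul_ediv_cancel_left _ (by omega)]
    have hcpos : 0 < c := by nlinarith
    have hdc : d ≤ c := by nlinarith
    have hdc' : d < c := by
      rcases lt_or_eq_of_le hdc with h | h
      · exact h
      · exact absurd (by omega : n / d = d) hne
    have hccn : n < c * c := by nlinarith
    have hcr : r < c := by
      by_contra hcr
      rw [not_lt] at hcr
      have : c * c ≤ n := (le_isq_iff n c (by omega) (by omega)).mpr (by omega)
      omega
    have hdvd' : n / d ∣ n := ⟨d, by rw [hcdiv, hc]; ring⟩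
    refine ⟨hdvd', by omega, ?_, by omega⟩
    rw [hcdiv]
    nlinarith
  -- big divisors are cofactors of q-elements
  have bigdiv : ∀ x : Int, r < x → x < n → x ∣ n → 2 ≤ x →
      (2 ≤ n / x ∧ n / x ≤ r ∧ n / x ∣ n ∧ n / (n / x) = x ∧ n / (n / x) ≠ n / x) := by
    intro x hrx hxn hdvd h2
    obtain ⟨c, hc⟩ := hdvd
    have hcdiv : n / x = c := by rw [hc, Int.mul_ediv_cancel_left _ (by omega)]
    have hcpos : 0 < c := by nlinarith
    have hc2 : 2 ≤ c := by
      rcases (by omega : c = 1 ∨ 2 ≤ c) with h | h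
      · subst h
        simp at hc
        omega
      · exact h
    have hxx : n < x * x := by
      by_contra hxx
      rw [not_lt] at hxx
      have := (le_isq_iff n x (by omega) (by omega)).mp hxx
      omega
    have hcx : c < x := by nlinarith
    have hcr : c ≤ r := by
      have : c * c ≤ n := by nlinarith
      exact (le_isq_iff n c (by omega) (by omega)).mp this
    have hback : n / c = x := by rw [hc, mul_comm, Int.mul_ediv_cancel_left _ (by omega)]
    rw [hcdiv, hback]
    exact ⟨by omega, by omega, ⟨x, by rw [hc]; ring⟩, rfl, by omega⟩
  -- strict antitonicity of cofactors on divisors in [2, r]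
  have anti : ∀ d1 d2 : Int, 2 ≤ d1 → d1 ∣ n → 2 ≤ d2 → d2 ∣ n → d1 < d2 →
      n / d2 < n / d1 := by
    intro d1 d2 h1 hd1 h2 hd2 hlt
    obtain ⟨c1, hc1⟩ := hd1
    obtain ⟨c2, hc2⟩ := hd2
    have e1 : n / d1 = c1 := by rw [hc1, Int.mul_ediv_cancel_left _ (by omega)]
    have e2 : n / d2 = c2 := by rw [hc2, Int.mul_ediv_cancel_left _ (by omega)]
    have hc1p : 0 < c1 := by nlinarith
    have hc2p : 0 < c2 := by nlinarith
    have : c2 < c1 := by nlinarith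
    omega
  -- now: equality of sorted lists via permutation + pairwise <
  have pwL : List.Pairwise (· < ·)
      ((PySem.List.pyRange 2 n 1).filter (fun d => PySem.Int.mod n d == 0)) :=
    (PySem.List.pairwise_lt_pyRange_one 2 n).filter _
  have pwS : List.Pairwise (· < ·)
      ((PySem.List.pyRange 2 (r + 1) 1).filter (fun d => PySem.Int.mod n d == 0)) :=
    (PySem.List.pairwise_lt_pyRange_one 2 (r + 1)).filter _
  have pwQ : List.Pairwise (· < ·)
      ((PySem.List.pyRange 2 (r + 1) 1).filter
        (fun d => (PySem.Int.mod n d == 0) && !(PySem.Int.floordiv n d == d))) :=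
    (PySem.List.pairwise_lt_pyRange_one 2 (r + 1)).filter _
  have pwLg : List.Pairwise (· < ·)
      ((((PySem.List.pyRange 2 (r + 1) 1).filter
          (fun d => (PySem.Int.mod n d == 0) && !(PySem.Int.floordiv n d == d))).map
          (fun d => PySem.Int.floordiv n d)).reverse) := by
    rw [List.pairwise_reverse, List.pairwise_map]
    refine pwQ.imp_of_mem ?_
    intro a b ha hb hab
    rw [memQ] at ha hb
    obtain ⟨ha1, ha2, ha3, _⟩ := ha
    obtain ⟨hb1, hb2, hb3, _⟩ := hb
    rw [PySem.Int.floordiv_eq_ediv_of_pos (by omega : (0:Int) < a),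
      PySem.Int.floordiv_eq_ediv_of_pos (by omega : (0:Int) < b)]
    exact anti a b ha1 ha3 hb1 hb3 hab
  have pwR : List.Pairwise (· < ·)
      ((PySem.List.pyRange 2 (r + 1) 1).filter (fun d => PySem.Int.mod n d == 0) ++
       (((PySem.List.pyRange 2 (r + 1) 1).filter
          (fun d => (PySem.Int.mod n d == 0) && !(PySem.Int.floordiv n d == d))).map
          (fun d => PySem.Int.floordiv n d)).reverse) := by
    rw [List.pairwise_append]
    refine ⟨pwS, pwLg, ?_⟩
    intro a ha b hb
    rw [memS] at ha
    rw [List.mem_reverse, List.mem_map] at hb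
    obtain ⟨d, hd, rfl⟩ := hb
    rw [memQ] at hd
    obtain ⟨hd1, hd2, hd3, hd4⟩ := hd
    rw [PySem.Int.floordiv_eq_ediv_of_pos (by omega : (0:Int) < d)]
    have := (cofac d hd1 hd2 hd3 hd4).2.1
    omega
  -- permutation via same membership + nodup
  have ndL := pwL.imp (fun h => ne_of_lt h)
  have ndR := pwR.imp (fun h => ne_of_lt h)
  have hmem : ∀ x : Int,
      (x ∈ (PySem.List.pyRange 2 n 1).filter (fun d => PySem.Int.mod n d == 0)) ↔
      (x ∈ (PySem.List.pyRange 2 (r + 1) 1).filter (fun d => PySem.Int.mod n d == 0) ++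
       (((PySem.List.pyRange 2 (r + 1) 1).filter
          (fun d => (PySem.Int.mod n d == 0) && !(PySem.Int.floordiv n d == d))).map
          (fun d => PySem.Int.floordiv n d)).reverse) := by
    intro x
    rw [List.mem_append, memL, memS, List.mem_reverse, List.mem_map]
    constructor
    · rintro ⟨h1, h2, h3⟩
      by_cases hxr : x ≤ r
      · exact Or.inl ⟨h1, hxr, h3⟩
      · right
        obtain ⟨g1, g2, g3, g4, g5⟩ := bigdiv x (by omega) h2 h3 h1
        refine ⟨n / x, ?_, ?_⟩
        · rw [memQ]; exact ⟨g1, g2, g3, g5⟩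
        · rw [PySem.Int.floordiv_eq_ediv_of_pos (by omega : (0:Int) < n / x)]
          exact g4
    · rintro (⟨h1, h2, h3⟩ | ⟨d, hd, rfl⟩)
      · exact ⟨h1, by omega, h3⟩
      · rw [memQ] at hd
        obtain ⟨hd1, hd2, hd3, hd4⟩ := hd
        obtain ⟨g1, g2, g3, g4⟩ := cofac d hd1 hd2 hd3 hd4
        rw [PySem.Int.floordiv_eq_ediv_of_pos (by omega : (0:Int) < d)]
        exact ⟨by omega, g3, g1⟩
  have hperm := (List.perm_ext_iff_of_nodup ndL ndR).mpr hmem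
  exact hperm.eq_of_pairwise (fun a b _ _ h1 h2 => absurd h2 (not_lt_of_gt h1)) pwL pwR

-- ===== VERDICT (by name: the statement is the Claim_ definition above) =====
theorem facteursDeN_spec : Claim_equal_facteursDeN := by
  intro n _
  unfold Spec_facteursDeN facteursDeN facteursDeN_alt
  by_cases h4 : n < 4
  · rw [if_pos h4]
    by_cases h2 : n ≤ 2
    · rw [PySem.List.pyRange_one_eq_nil (by omega)]
      simp
    · have : n = 3 := by omega
      subst this
      decide
  · have h4' : 4 ≤ n := by omega
    rw [if_neg h4, altLoop_char n h4' 2 [] [] (by omega)]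
    simp only [List.nil_append]
    rw [PySem.List.foldl_append_if_eq_filter, List.nil_append, lists_eq n h4']
    have hsub : ((PySem.List.pyRange 2 (isq n + 1) 1).filter
        (fun d => PySem.Int.mod n d == 0)) = [] →
        ((PySem.List.pyRange 2 (isq n + 1) 1).filter
          (fun d => (PySem.Int.mod n d == 0) && !(PySem.Int.floordiv n d == d))) = [] := by
      intro h
      rw [List.filter_eq_nil_iff] at h ⊢
      intro a ha
      simp only [Bool.and_eq_true, not_and]
      intro hp
      exact absurd hp (h a ha)
    by_cases hS : ((PySem.List.pyRange 2 (isq n + 1) 1).filter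
        (fun d => PySem.Int.mod n d == 0)) = []
    · rw [if_pos hS, hS, hsub hS]
      simp
    · rw [if_neg hS, if_neg (by simp [hS])]
      rfl
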